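-- pv_equiv track=rewrite | github.com/raeez/chiral-bar-cobar | compute/lib/cy_elliptic_chiral_engine.py | _local_cdr_states
-- ===== SOURCE A (Python) =====
-- def _local_cdr_states(weight: int, bosonic: bool = True) -> int:
--     """Number of bosonic (or fermionic) states at given weight in the LOCAL CDR.
--
--     The local betagamma-bc system on a 1-dimensional manifold has generating function:
--       ch(q) = prod_{n>=1} ((1 + q^n)^2 / (1 - q^n)^2)
--     (each factor: one fermionic pair (1+q^n)^2 and one bosonic pair 1/(1-q^n)^2).
--
--     The bosonic/fermionic decomposition at weight n gives the number of states
--     of each parity.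
--     """
--     if weight < 0:
--         return 0
--     if weight == 0:
--         # The vacuum state is bosonic (even parity).
--         return 1 if bosonic else 0
--
--     # Compute via generating function decomposition
--     # Bosonic: prod_{n>=1} 1/(1-q^n)^2  (two bosonic oscillators beta_{-n}, gamma_{-n+1}... )
--     # Fermionic: prod_{n>=1} (1+q^n)^2  (two fermionic oscillators b_{-n}, c_{-n+1}... )
--     #
--     # The full partition function is the product of these.
--     # At weight w, the coefficient decomposes into a sum over
--     # (bosonic weight w_b) * (fermionic weight w_f) with w_b + w_f = w
--     # and the fermionic parity determined by w_f being even or odd (in count).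
--
--     nmax = weight + 1
--     # Bosonic partition: 2 copies of oscillators
--     bos = [0] * nmax
--     bos[0] = 1
--     for n in range(1, nmax):
--         # Add oscillator at level n (two copies)
--         new_bos = [0] * nmax
--         for i in range(nmax):
--             if bos[i] == 0:
--                 continue
--             for j in range(nmax):
--                 k1 = i + j * n
--                 if k1 >= nmax:
--                     break
--                 # Two copies: number of ways to distribute j quanta among 2 oscillators
--                 # = j + 1 (stars and bars)
--                 new_bos[k1] += bos[i] * (j + 1)
--         bos = new_bos
--
--     # Fermionic partition: 2 copies of oscillators
--     ferm_even = [0] * nmax  # even number of fermions (bosonic total parity)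
--     ferm_odd = [0] * nmax   # odd number of fermions (fermionic total parity)
--     ferm_even[0] = 1
--     for n in range(1, nmax):
--         new_even = list(ferm_even)
--         new_odd = list(ferm_odd)
--         # Two fermionic oscillators at level n: can occupy (0,0), (1,0), (0,1), (1,1)
--         # (0,0): no change (even parity preserved)
--         # (1,0) or (0,1): adds n to weight, flips parity
--         # (1,1): adds 2n to weight, preserves parity
--         for i in range(nmax):
--             # (1,0) + (0,1): 2 ways to add one fermion
--             if i + n < nmax:
--                 new_even[i + n] += 2 * ferm_odd[i]
--                 new_odd[i + n] += 2 * ferm_even[i]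
--             # (1,1): both occupied
--             if i + 2 * n < nmax:
--                 new_even[i + 2 * n] += ferm_even[i]
--                 new_odd[i + 2 * n] += ferm_odd[i]
--         ferm_even = new_even
--         ferm_odd = new_odd
--
--     # Total bosonic states at weight w: sum_{w_b + w_f = w} bos[w_b] * ferm_even[w_f]
--     # Total fermionic states: sum_{w_b + w_f = w} bos[w_b] * ferm_odd[w_f]
--     total_bos = 0
--     total_ferm = 0
--     for wb in range(weight + 1):
--         wf = weight - wb
--         if wf >= 0 and wf < nmax:
--             total_bos += bos[wb] * ferm_even[wf]
--             total_ferm += bos[wb] * ferm_odd[wf]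
--
--     return total_bos if bosonic else total_ferm
-- ===== SOURCE B (Python) =====
-- def _local_cdr_states(weight: int, bosonic: bool = True) -> int:
--     """Same count, computed by per-factor prefix recurrences.
--
--     Bosonic part: apply each 1/(1-q^n) factor twice via the in-place forward
--     recurrence new[k] += new[k-n], instead of A's stars-and-bars inner loop.
--     Fermionic parity split: track P = prod (1+q^n)^2 and S = prod (1-q^n)^2
--     by in-place backward passes; even = (P+S)/2, odd = (P-S)/2.
--     """
--     if weight < 0:
--         return 0
--     N = weight + 1
--     bos = [0] * N
--     bos[0] = 1
--     for n in range(1, N):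
--         for _ in range(2):
--             for k in range(n, N):
--                 bos[k] += bos[k - n]
--     P = [0] * N
--     S = [0] * N
--     P[0] = 1
--     S[0] = 1
--     for n in range(1, N):
--         for _ in range(2):
--             for k in range(N - 1, n - 1, -1):
--                 P[k] += P[k - n]
--                 S[k] -= S[k - n]
--     total = 0
--     for wb in range(N):
--         wf = N - 1 - wb
--         half = (P[wf] + S[wf]) // 2 if bosonic else (P[wf] - S[wf]) // 2
--         total += bos[wb] * half
--     return total
-- ===== Notes on version B (the rewrite author's own statement) =====
-- stated objective: faster
-- what changed: Each 1/(1-q^n)^2 factor is applied by two in-place forward prefix recurrences new[k]+=new[k-n] instead of A's stars-and-bars double inner loop, and the fermionic even/odd split is recovered as ((P+S)/2,(P-S)/2) from the two plain products P=prod(1+q^n)^2 and S=prod(1-q^n)^2 maintained by backward passes, instead of A's coupled parity-pair scatter.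
import Mathlib
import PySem

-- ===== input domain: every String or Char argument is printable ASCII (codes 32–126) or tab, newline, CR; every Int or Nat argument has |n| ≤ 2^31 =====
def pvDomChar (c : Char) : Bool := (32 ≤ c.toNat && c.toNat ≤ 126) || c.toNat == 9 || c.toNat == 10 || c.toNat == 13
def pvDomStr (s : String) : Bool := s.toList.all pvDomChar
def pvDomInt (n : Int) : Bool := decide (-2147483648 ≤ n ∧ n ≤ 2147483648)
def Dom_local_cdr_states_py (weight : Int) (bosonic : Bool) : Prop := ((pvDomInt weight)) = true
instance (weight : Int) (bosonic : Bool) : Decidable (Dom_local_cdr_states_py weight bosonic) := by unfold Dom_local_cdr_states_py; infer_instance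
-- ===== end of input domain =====

-- B applies each generating-function factor by in-place prefix recurrences and recovers the
-- even/odd fermion split from the two plain products P, S; intended as faster (the timing
-- run measured B ~6x faster than A at the largest size both finished).

-- ===== PORT A =====
-- `for j in range(nmax): k1 = i + j*n; if k1 >= nmax: break; new_bos[k1] += bos[i]*(j+1)`
-- (fuel = nmax iterations, early exit on k1 >= nmax, exactly Python's for-with-break)
def pvAInner (nmax n i : Nat) (bi : Int) : Nat → Nat → List Int → List Int
  | 0, _, nb => nb
  | fuel+1, j, nb =>
    let k1 := i + j * n
    if nmax ≤ k1 then nb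
    else pvAInner nmax n i bi fuel (j+1) (nb.set k1 (nb.getD k1 0 + bi * ((j : Int) + 1)))

def pvAStepBos (nmax n : Nat) (bos : List Int) : List Int :=
  (List.range nmax).foldl
    (fun nb i => if bos.getD i 0 = 0 then nb else pvAInner nmax n i (bos.getD i 0) nmax 0 nb)
    (List.replicate nmax 0)

def pvAStepFerm (nmax n : Nat) (fe fo : List Int) : List Int × List Int :=
  (List.range nmax).foldl
    (fun p i =>
      let p1 := if i + n < nmax then
          (p.1.set (i+n) (p.1.getD (i+n) 0 + 2 * fo.getD i 0),
           p.2.set (i+n) (p.2.getD (i+n) 0 + 2 * fe.getD i 0)) else p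
      if i + 2*n < nmax then
          (p1.1.set (i+2*n) (p1.1.getD (i+2*n) 0 + fe.getD i 0),
           p1.2.set (i+2*n) (p1.2.getD (i+2*n) 0 + fo.getD i 0)) else p1)
    (fe, fo)

def local_cdr_states_py (weight : Int) (bosonic : Bool) : Int :=
  if weight < 0 then 0
  else if weight = 0 then (if bosonic then 1 else 0)
  else
    let nmax := (weight + 1).toNat
    let bos := (List.range' 1 (nmax - 1)).foldl (fun b n => pvAStepBos nmax n b)
                 ((List.replicate nmax (0:Int)).set 0 1)
    let fp := (List.range' 1 (nmax - 1)).foldl (fun p n => pvAStepFerm nmax n p.1 p.2)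
                 ((List.replicate nmax (0:Int)).set 0 1, List.replicate nmax (0:Int))
    let t := (List.range (weight.toNat + 1)).foldl
      (fun (t : Int × Int) (wb : Nat) =>
        let wf : Int := weight - (wb : Int)
        if 0 ≤ wf ∧ wf < (nmax : Int) then
          (t.1 + bos.getD wb 0 * fp.1.getD wf.toNat 0,
           t.2 + bos.getD wb 0 * fp.2.getD wf.toNat 0)
        else t) (0, 0)
    if bosonic then t.1 else t.2

-- ===== PORT B =====
-- `for k in range(n, N): l[k] += l[k-n]`  (in-place forward pass)
def pvBFwd (N n : Nat) (l : List Int) : List Int :=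
  (List.range' n (N - n)).foldl (fun a k => a.set k (a.getD k 0 + a.getD (k - n) 0)) l

-- `for k in range(N-1, n-1, -1): P[k] += P[k-n]; S[k] -= S[k-n]` — that range is the
-- reverse of range(n, N), ported as such
def pvBBwd (N n : Nat) (p : List Int × List Int) : List Int × List Int :=
  ((List.range' n (N - n)).reverse).foldl
    (fun p k => (p.1.set k (p.1.getD k 0 + p.1.getD (k - n) 0),
                 p.2.set k (p.2.getD k 0 - p.2.getD (k - n) 0))) p

def local_cdr_states_py_alt (weight : Int) (bosonic : Bool) : Int :=
  if weight < 0 then 0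
  else
    let N := (weight + 1).toNat
    let bos := (List.range' 1 (N - 1)).foldl (fun b n => pvBFwd N n (pvBFwd N n b))
                 ((List.replicate N (0:Int)).set 0 1)
    let ps := (List.range' 1 (N - 1)).foldl (fun p n => pvBBwd N n (pvBBwd N n p))
                 ((List.replicate N (0:Int)).set 0 1, (List.replicate N (0:Int)).set 0 1)
    (List.range N).foldl
      (fun t wb =>
        let wf := N - 1 - wb
        let half := if bosonic then PySem.Int.floordiv (ps.1.getD wf 0 + ps.2.getD wf 0) 2
                    else PySem.Int.floordiv (ps.1.getD wf 0 - ps.2.getD wf 0) 2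
        t + bos.getD wb 0 * half) 0

-- ===== PRECONDITION & SPEC =====
def Spec_local_cdr_states_py (weight : Int) (bosonic : Bool) (out : Int) : Prop := out = local_cdr_states_py_alt weight bosonic
instance (weight : Int) (bosonic : Bool) (out : Int) : Decidable (Spec_local_cdr_states_py weight bosonic out) := by unfold Spec_local_cdr_states_py; infer_instance

-- ===== CLAIM (what is proved, stated in full; the proofs are below) =====
def Claim_equal_local_cdr_states_py : Prop := ∀ (weight : Int) (bosonic : Bool), Dom_local_cdr_states_py weight bosonic → Spec_local_cdr_states_py weight bosonic (local_cdr_states_py weight bosonic)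

-- ===== LEMMAS AND PROOFS =====

-- getD/set basics ------------------------------------------------------------
theorem pv_getD_set (l : List Int) (i j : Nat) (v : Int) :
    (l.set i v).getD j 0 = if i = j ∧ i < l.length then v else l.getD j 0 := by
  simp only [List.getD_eq_getElem?_getD, List.getElem?_set]
  split_ifs with h1 h2 h3 <;> simp_all <;> omega

theorem pv_getD_of_len_le (l : List Int) (k : Nat) (h : l.length ≤ k) : l.getD k 0 = 0 := by
  simp [List.getD_eq_getElem?_getD, List.getElem?_eq_none h]

-- the pure single-pass recurrence g(k) = f(k) + g(k-n)
def pvF1 (n : Nat) (f : Nat → Int) (k : Nat) : Int :=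
  if n = 0 ∨ k < n then f k else f k + pvF1 n f (k - n)
termination_by k
decreasing_by omega

theorem pvF1_congr (n : Nat) (f g : Nat → Int) (k : Nat)
    (h : ∀ j, j ≤ k → f j = g j) : pvF1 n f k = pvF1 n g k := by
  induction k using Nat.strong_induction_on with
  | _ k ih =>
    conv_lhs => rw [pvF1]
    conv_rhs => rw [pvF1]
    by_cases hc : n = 0 ∨ k < n
    · rw [if_pos hc, if_pos hc, h k le_rfl]
    · simp only [hc, if_false]
      rw [h k le_rfl, ih (k - n) (by omega) (fun j hj => h j (by omega))]

-- closed sums ----------------------------------------------------------------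
def pvT1 (f : Nat → Int) (n k : Nat) : Int :=
  ∑ t ∈ Finset.range (k+1), (if t * n ≤ k then f (k - t * n) else 0)

def pvT (f : Nat → Int) (n k : Nat) : Int :=
  ∑ t ∈ Finset.range (k+1), (if t * n ≤ k then f (k - t * n) * ((t : Int) + 1) else 0)

theorem pvT1_lt (f : Nat → Int) (n k : Nat) (hn : 1 ≤ n) (hk : k < n) : pvT1 f n k = f k := by
  rw [pvT1, Finset.sum_eq_single_of_mem 0 (Finset.mem_range.2 (by omega))]
  · simp
  · intro t _ ht
    rw [if_neg]
    have := Nat.mul_le_mul_right n (show 1 ≤ t by omega)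
    omega

theorem pvT1_rec (f : Nat → Int) (n k : Nat) (hn : 1 ≤ n) (hk : n ≤ k) :
    pvT1 f n k = f k + pvT1 f n (k - n) := by
  rw [pvT1, pvT1, Finset.sum_range_succ']
  have h0 : (if 0 * n ≤ k then f (k - 0 * n) else 0) = f k := by simp
  rw [h0, add_comm]
  congr 1
  have hsub : Finset.range (k - n + 1) ⊆ Finset.range k :=
    fun x hx => Finset.mem_range.2 (by have := Finset.mem_range.1 hx; omega)
  have hz : ∀ t ∈ Finset.range k, t ∉ Finset.range (k - n + 1) →
      (if t * n ≤ k - n then f (k - n - t * n) else 0) = 0 := by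
    intro t ht hnot
    rw [if_neg]
    have := Nat.le_mul_of_pos_right t hn
    simp only [Finset.mem_range] at ht hnot
    omega
  calc (∑ t ∈ Finset.range k, if (t + 1) * n ≤ k then f (k - (t + 1) * n) else 0)
      = ∑ t ∈ Finset.range k, (if t * n ≤ k - n then f (k - n - t * n) else 0) := by
        refine Finset.sum_congr rfl (fun t _ => ?_)
        have h1 : (t + 1) * n = t * n + n := by ring
        by_cases hc : t * n ≤ k - n
        · rw [if_pos hc, if_pos (by omega), show k - n - t * n = k - (t + 1) * n by omega]
        · rw [if_neg hc, if_neg (by omega)]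
    _ = ∑ t ∈ Finset.range (k - n + 1), (if t * n ≤ k - n then f (k - n - t * n) else 0) :=
        (Finset.sum_subset hsub hz).symm

theorem pvT_lt (f : Nat → Int) (n k : Nat) (hn : 1 ≤ n) (hk : k < n) : pvT f n k = f k := by
  rw [pvT, Finset.sum_eq_single_of_mem 0 (Finset.mem_range.2 (by omega))]
  · simp
  · intro t _ ht
    rw [if_neg]
    have := Nat.mul_le_mul_right n (show 1 ≤ t by omega)
    omega

theorem pvT_rec (f : Nat → Int) (n k : Nat) (hn : 1 ≤ n) (hk : n ≤ k) :
    pvT f n k = pvT1 f n k + pvT f n (k - n) := by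
  rw [pvT, pvT1]
  have split : ∀ t : Nat, (if t * n ≤ k then f (k - t * n) * ((t : Int) + 1) else 0) =
      (if t * n ≤ k then f (k - t * n) else 0) +
      (if t * n ≤ k then f (k - t * n) * (t : Int) else 0) := by
    intro t; split_ifs with hc <;> ring
  rw [Finset.sum_congr rfl (fun t _ => split t), Finset.sum_add_distrib]
  congr 1
  rw [Finset.sum_range_succ']
  have h0 : (if 0 * n ≤ k then f (k - 0 * n) * ((0 : Nat) : Int) else 0) = 0 := by simp
  rw [h0, add_zero, pvT]
  have hsub : Finset.range (k - n + 1) ⊆ Finset.range k :=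
    fun x hx => Finset.mem_range.2 (by have := Finset.mem_range.1 hx; omega)
  have hz : ∀ t ∈ Finset.range k, t ∉ Finset.range (k - n + 1) →
      (if t * n ≤ k - n then f (k - n - t * n) * ((t : Int) + 1) else 0) = 0 := by
    intro t ht hnot
    rw [if_neg]
    have := Nat.le_mul_of_pos_right t hn
    simp only [Finset.mem_range] at ht hnot
    omega
  calc (∑ t ∈ Finset.range k, if (t + 1) * n ≤ k then f (k - (t + 1) * n) * (((t : Nat) + 1 : Nat) : Int) else 0)
      = ∑ t ∈ Finset.range k, (if t * n ≤ k - n then f (k - n - t * n) * ((t : Int) + 1) else 0) := by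
        refine Finset.sum_congr rfl (fun t _ => ?_)
        have h1 : (t + 1) * n = t * n + n := by ring
        by_cases hc : t * n ≤ k - n
        · rw [if_pos hc, if_pos (by omega), show k - n - t * n = k - (t + 1) * n by omega]
          push_cast; ring
        · rw [if_neg hc, if_neg (by omega)]
    _ = ∑ t ∈ Finset.range (k - n + 1), (if t * n ≤ k - n then f (k - n - t * n) * ((t : Int) + 1) else 0) :=
        (Finset.sum_subset hsub hz).symm

theorem pvF1_eq_T1 (n : Nat) (f : Nat → Int) (k : Nat) (hn : 1 ≤ n) :
    pvF1 n f k = pvT1 f n k := by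
  induction k using Nat.strong_induction_on with
  | _ k ih =>
    rw [pvF1]
    by_cases hc : k < n
    · rw [if_pos (Or.inr hc), pvT1_lt f n k hn hc]
    · rw [if_neg (by omega), pvT1_rec f n k hn (by omega), ih (k - n) (by omega)]

theorem pvF1_F1_eq_T (n : Nat) (f : Nat → Int) (k : Nat) (hn : 1 ≤ n) :
    pvF1 n (pvF1 n f) k = pvT f n k := by
  induction k using Nat.strong_induction_on with
  | _ k ih =>
    conv_lhs => rw [pvF1]
    by_cases hc : k < n
    · rw [if_pos (Or.inr hc), pvT_lt _ n k hn hc, pvF1, if_pos (Or.inr hc)]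
    · rw [if_neg (by omega), pvT_rec f n k hn (by omega), ih (k - n) (by omega),
        pvF1_eq_T1 n f k hn]

-- A: inner j-loop ------------------------------------------------------------
theorem pvAInner_length (nmax n i : Nat) (bi : Int) (fuel j : Nat) (nb : List Int) :
    (pvAInner nmax n i bi fuel j nb).length = nb.length := by
  induction fuel generalizing j nb with
  | zero => rfl
  | succ fuel ih =>
    rw [pvAInner]
    split
    · rfl
    · rw [ih]; simp

theorem pvAInner_getD (nmax n i : Nat) (bi : Int) (fuel j : Nat) (nb : List Int)
    (hn : 1 ≤ n) (hlen : nb.length = nmax) (k : Nat) :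
    (pvAInner nmax n i bi fuel j nb).getD k 0 =
      nb.getD k 0 + ∑ t ∈ Finset.Ico j (j + fuel),
        (if k = i + t * n ∧ k < nmax then bi * ((t : Int) + 1) else 0) := by
  induction fuel generalizing j nb with
  | zero => simp [pvAInner]
  | succ fuel ih =>
    rw [pvAInner]
    by_cases hbr : nmax ≤ i + j * n
    · rw [if_pos hbr, Finset.sum_eq_zero, add_zero]
      intro t ht
      simp only [Finset.mem_Ico] at ht
      rw [if_neg]
      rintro ⟨hk1, hk2⟩
      have := Nat.mul_le_mul_right n ht.1
      omega
    · rw [if_neg hbr, ih (j+1) _ (by simp [hlen]),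
        Finset.sum_eq_sum_Ico_succ_bot (by omega : j < j + (fuel + 1)),
        show j + 1 + fuel = j + (fuel + 1) by omega, pv_getD_set]
      by_cases hk : i + j * n = k
      · rw [if_pos ⟨hk, by omega⟩, if_pos ⟨hk.symm, by omega⟩, hk]
        ring
      · rw [if_neg (by tauto), if_neg (by rintro ⟨h1, _⟩; exact hk h1.symm)]
        ring

-- A: bosonic step ------------------------------------------------------------
theorem pvABos_fold_len (nmax n : Nat) (bos : List Int) (xs : List Nat) (l : List Int) :
    (xs.foldl (fun nb i => if bos.getD i 0 = 0 then nb
      else pvAInner nmax n i (bos.getD i 0) nmax 0 nb) l).length = l.length := by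
  induction xs generalizing l with
  | nil => rfl
  | cons x xs ih =>
    rw [List.foldl_cons, ih]
    split
    · rfl
    · rw [pvAInner_length]

theorem pvAStepBos_length (nmax n : Nat) (bos : List Int) :
    (pvAStepBos nmax n bos).length = nmax := by
  rw [pvAStepBos, pvABos_fold_len]; simp

theorem pvAStepBos_getD (nmax n : Nat) (bos : List Int) (hn : 1 ≤ n)
    (hlen : bos.length = nmax) (k : Nat) (hk : k < nmax) :
    (pvAStepBos nmax n bos).getD k 0 = pvT (fun j => bos.getD j 0) n k := by
  have inv : ∀ (m : Nat),
      ((List.range m).foldl (fun nb i => if bos.getD i 0 = 0 then nb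
          else pvAInner nmax n i (bos.getD i 0) nmax 0 nb)
        (List.replicate nmax (0:Int))).getD k 0 =
      ∑ i ∈ Finset.range m, ∑ t ∈ Finset.range nmax,
        (if k = i + t * n then bos.getD i 0 * ((t : Int) + 1) else 0) := by
    intro m
    induction m with
    | zero => simp
    | succ m ih =>
      rw [List.range_succ, List.foldl_append, List.foldl_cons, List.foldl_nil,
        Finset.sum_range_succ, ← ih]
      by_cases hz : bos.getD m 0 = 0
      · rw [if_pos hz, Finset.sum_eq_zero (fun t _ => by rw [hz]; split <;> ring), add_zero]
      · rw [if_neg hz, pvAInner_getD nmax n m (bos.getD m 0) nmax 0 _ hn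
          (by rw [pvABos_fold_len]; simp) k]
        congr 1
        rw [Nat.zero_add, ← Finset.range_eq_Ico]
        refine Finset.sum_congr rfl (fun t _ => ?_)
        by_cases hc : k = m + t * n
        · rw [if_pos ⟨hc, hk⟩, if_pos hc]
        · rw [if_neg (by tauto), if_neg hc]
  rw [pvAStepBos, inv nmax, Finset.sum_comm]
  have hcoll : ∀ t : Nat, (∑ i ∈ Finset.range nmax,
      if k = i + t * n then bos.getD i 0 * ((t : Int) + 1) else 0) =
      (if t * n ≤ k then bos.getD (k - t * n) 0 * ((t : Int) + 1) else 0) := by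
    intro t
    by_cases hc : t * n ≤ k
    · rw [if_pos hc,
        Finset.sum_eq_single_of_mem (k - t * n) (Finset.mem_range.2 (by omega))]
      · rw [if_pos (by omega)]
      · intro b _ hb
        rw [if_neg (by omega)]
    · rw [if_neg hc]
      exact Finset.sum_eq_zero (fun i _ => by rw [if_neg (by omega)])
  rw [Finset.sum_congr rfl (fun t _ => hcoll t), pvT]
  refine (Finset.sum_subset (fun x hx => Finset.mem_range.2
    (by have := Finset.mem_range.1 hx; omega)) (fun t ht hnot => ?_)).symm
  rw [if_neg]
  have := Nat.le_mul_of_pos_right t hn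
  simp only [Finset.mem_range] at ht hnot
  omega

-- B: forward pass ------------------------------------------------------------
theorem pv_foldl_set_length (xs : List Nat) (g : List Int → Nat → Int) (l : List Int) :
    (xs.foldl (fun a k => a.set k (g a k)) l).length = l.length := by
  induction xs generalizing l with
  | nil => rfl
  | cons x xs ih => rw [List.foldl_cons, ih]; simp

theorem pvBFwd_length (N n : Nat) (l : List Int) : (pvBFwd N n l).length = l.length := by
  exact pv_foldl_set_length _ _ _

theorem pvBFwd_getD (N n : Nat) (l : List Int) (hn : 1 ≤ n) (hlen : l.length = N)
    (k : Nat) (hk : k < N) :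
    (pvBFwd N n l).getD k 0 = pvF1 n (fun j => l.getD j 0) k := by
  have inv : ∀ m, n + m ≤ N → ∀ k,
      ((List.range' n m).foldl (fun a k => a.set k (a.getD k 0 + a.getD (k - n) 0)) l).getD k 0 =
        if n ≤ k ∧ k < n + m then pvF1 n (fun j => l.getD j 0) k else l.getD k 0 := by
    intro m
    induction m with
    | zero => intro _ k; simp
    | succ m ih =>
      intro hm k
      rw [List.range'_concat, List.foldl_append, List.foldl_cons, List.foldl_nil, one_mul]
      have hlen2 := pv_foldl_set_length (List.range' n m)
        (fun a k => a.getD k 0 + a.getD (k - n) 0) l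
      rw [pv_getD_set]
      have htop : ((List.range' n m).foldl
          (fun a k => a.set k (a.getD k 0 + a.getD (k - n) 0)) l).getD (n + m) 0 =
          l.getD (n + m) 0 := by rw [ih (by omega)]; rw [if_neg (by omega)]
      have hmid : ((List.range' n m).foldl
          (fun a k => a.set k (a.getD k 0 + a.getD (k - n) 0)) l).getD (n + m - n) 0 =
          pvF1 n (fun j => l.getD j 0) m := by
        rw [show n + m - n = m by omega, ih (by omega)]
        by_cases hnm : n ≤ m
        · rw [if_pos ⟨hnm, by omega⟩]
        · rw [if_neg (by omega), pvF1, if_pos (by omega)]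
      by_cases hk : n + m = k
      · subst hk
        rw [if_pos ⟨rfl, by rw [hlen2, hlen]; omega⟩, htop, hmid, if_pos (by omega)]
        conv_rhs => rw [pvF1]
        rw [if_neg (by omega), show n + m - n = m by omega]
      · rw [if_neg (by tauto), ih (by omega)]
        by_cases hc : n ≤ k ∧ k < n + m
        · rw [if_pos hc, if_pos ⟨hc.1, by omega⟩]
        · rw [if_neg hc, if_neg (by omega)]
  by_cases hnN : n ≤ N
  · rw [pvBFwd, inv (N - n) (by omega) k]
    by_cases hc : n ≤ k
    · rw [if_pos ⟨hc, by omega⟩]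
    · rw [if_neg (by omega), pvF1, if_pos (by omega)]
  · rw [pvBFwd, show N - n = 0 by omega]
    simp only [List.range', List.foldl_nil]
    rw [pvF1, if_pos (by omega)]

-- A: fermionic step ----------------------------------------------------------
theorem pvAFerm_fold_len (nmax n : Nat) (fe fo : List Int) (xs : List Nat)
    (p : List Int × List Int) :
    ((xs.foldl (fun p i =>
      let p1 := if i + n < nmax then
          (p.1.set (i+n) (p.1.getD (i+n) 0 + 2 * fo.getD i 0),
           p.2.set (i+n) (p.2.getD (i+n) 0 + 2 * fe.getD i 0)) else p
      if i + 2*n < nmax then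
          (p1.1.set (i+2*n) (p1.1.getD (i+2*n) 0 + fe.getD i 0),
           p1.2.set (i+2*n) (p1.2.getD (i+2*n) 0 + fo.getD i 0)) else p1) p)).1.length
      = p.1.length ∧
    ((xs.foldl (fun p i =>
      let p1 := if i + n < nmax then
          (p.1.set (i+n) (p.1.getD (i+n) 0 + 2 * fo.getD i 0),
           p.2.set (i+n) (p.2.getD (i+n) 0 + 2 * fe.getD i 0)) else p
      if i + 2*n < nmax then
          (p1.1.set (i+2*n) (p1.1.getD (i+2*n) 0 + fe.getD i 0),
           p1.2.set (i+2*n) (p1.2.getD (i+2*n) 0 + fo.getD i 0)) else p1) p)).2.length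
      = p.2.length := by
  induction xs generalizing p with
  | nil => exact ⟨rfl, rfl⟩
  | cons x xs ih =>
    rw [List.foldl_cons]
    refine (ih _).imp (fun h => h.trans ?_) (fun h => h.trans ?_) <;>
      dsimp only <;> split_ifs <;> simp

theorem pvAStepFerm_length (nmax n : Nat) (fe fo : List Int) :
    (pvAStepFerm nmax n fe fo).1.length = fe.length ∧
    (pvAStepFerm nmax n fe fo).2.length = fo.length := by
  exact pvAFerm_fold_len nmax n fe fo (List.range nmax) (fe, fo)

theorem pvAFermStep_getD (nmax n m : Nat) (fe fo : List Int) (p : List Int × List Int)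
    (hn : 1 ≤ n) (he : p.1.length = nmax) (ho : p.2.length = nmax) (k : Nat) (hk : k < nmax) :
    ((fun (p : List Int × List Int) (i : Nat) =>
      let p1 := if i + n < nmax then
          (p.1.set (i+n) (p.1.getD (i+n) 0 + 2 * fo.getD i 0),
           p.2.set (i+n) (p.2.getD (i+n) 0 + 2 * fe.getD i 0)) else p
      if i + 2*n < nmax then
          (p1.1.set (i+2*n) (p1.1.getD (i+2*n) 0 + fe.getD i 0),
           p1.2.set (i+2*n) (p1.2.getD (i+2*n) 0 + fo.getD i 0)) else p1) p m).1.getD k 0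
      = p.1.getD k 0 + (if m + n = k then 2 * fo.getD m 0 else 0)
          + (if m + 2*n = k then fe.getD m 0 else 0) ∧
    ((fun (p : List Int × List Int) (i : Nat) =>
      let p1 := if i + n < nmax then
          (p.1.set (i+n) (p.1.getD (i+n) 0 + 2 * fo.getD i 0),
           p.2.set (i+n) (p.2.getD (i+n) 0 + 2 * fe.getD i 0)) else p
      if i + 2*n < nmax then
          (p1.1.set (i+2*n) (p1.1.getD (i+2*n) 0 + fe.getD i 0),
           p1.2.set (i+2*n) (p1.2.getD (i+2*n) 0 + fo.getD i 0)) else p1) p m).2.getD k 0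
      = p.2.getD k 0 + (if m + n = k then 2 * fe.getD m 0 else 0)
          + (if m + 2*n = k then fo.getD m 0 else 0) := by
  dsimp only
  constructor <;>
  · by_cases hc1 : m + n < nmax <;> by_cases hc2 : m + 2*n < nmax <;>
      simp only [hc1, hc2, if_true, if_false,
        apply_ite (Prod.fst (α := List Int) (β := List Int)),
        apply_ite (Prod.snd (α := List Int) (β := List Int)), pv_getD_set, List.length_set,
        he, ho, and_true, true_and] <;>
      split_ifs <;> first | omega | (subst_vars; ring) | ring

theorem pvAStepFerm_getD (nmax n : Nat) (fe fo : List Int) (hn : 1 ≤ n)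
    (he : fe.length = nmax) (ho : fo.length = nmax) (k : Nat) (hk : k < nmax) :
    (pvAStepFerm nmax n fe fo).1.getD k 0 =
      fe.getD k 0 + (if n ≤ k then 2 * fo.getD (k - n) 0 else 0)
        + (if 2 * n ≤ k then fe.getD (k - 2 * n) 0 else 0) ∧
    (pvAStepFerm nmax n fe fo).2.getD k 0 =
      fo.getD k 0 + (if n ≤ k then 2 * fe.getD (k - n) 0 else 0)
        + (if 2 * n ≤ k then fo.getD (k - 2 * n) 0 else 0) := by
  rw [pvAStepFerm]
  have inv : ∀ m,
      ((List.range m).foldl (fun p i =>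
        let p1 := if i + n < nmax then
            (p.1.set (i+n) (p.1.getD (i+n) 0 + 2 * fo.getD i 0),
             p.2.set (i+n) (p.2.getD (i+n) 0 + 2 * fe.getD i 0)) else p
        if i + 2*n < nmax then
            (p1.1.set (i+2*n) (p1.1.getD (i+2*n) 0 + fe.getD i 0),
             p1.2.set (i+2*n) (p1.2.getD (i+2*n) 0 + fo.getD i 0)) else p1) (fe, fo)).1.getD k 0
        = fe.getD k 0 + (if n ≤ k ∧ k - n < m then 2 * fo.getD (k - n) 0 else 0)
          + (if 2*n ≤ k ∧ k - 2*n < m then fe.getD (k - 2*n) 0 else 0) ∧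
      ((List.range m).foldl (fun p i =>
        let p1 := if i + n < nmax then
            (p.1.set (i+n) (p.1.getD (i+n) 0 + 2 * fo.getD i 0),
             p.2.set (i+n) (p.2.getD (i+n) 0 + 2 * fe.getD i 0)) else p
        if i + 2*n < nmax then
            (p1.1.set (i+2*n) (p1.1.getD (i+2*n) 0 + fe.getD i 0),
             p1.2.set (i+2*n) (p1.2.getD (i+2*n) 0 + fo.getD i 0)) else p1) (fe, fo)).2.getD k 0
        = fo.getD k 0 + (if n ≤ k ∧ k - n < m then 2 * fe.getD (k - n) 0 else 0)
          + (if 2*n ≤ k ∧ k - 2*n < m then fo.getD (k - 2*n) 0 else 0) := by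
    intro m
    induction m with
    | zero => simp
    | succ m ih =>
      rw [List.range_succ, List.foldl_append, List.foldl_cons, List.foldl_nil]
      have hlen := pvAFerm_fold_len nmax n fe fo (List.range m) (fe, fo)
      obtain ⟨s1, s2⟩ := pvAFermStep_getD nmax n m fe fo _ hn (hlen.1.trans he)
        (hlen.2.trans ho) k hk
      constructor
      · rw [s1, ih.1]
        by_cases h1k : m + n = k
        · have hkn : k - n = m := by omega
          rw [hkn, if_pos h1k,
            if_neg (show ¬(m + 2*n = k) by omega),
            if_neg (show ¬(n ≤ k ∧ m < m) by omega),
            if_pos (show n ≤ k ∧ m < m + 1 by omega),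
            if_congr (show (2*n ≤ k ∧ k - 2*n < m) ↔ (2*n ≤ k ∧ k - 2*n < m + 1) by omega) rfl rfl]
          ring
        · by_cases h2k : m + 2*n = k
          · have hkn : k - 2*n = m := by omega
            rw [hkn, if_pos h2k, if_neg h1k,
              if_neg (show ¬(2*n ≤ k ∧ m < m) by omega),
              if_pos (show 2*n ≤ k ∧ m < m + 1 by omega),
              if_congr (show (n ≤ k ∧ k - n < m) ↔ (n ≤ k ∧ k - n < m + 1) by omega) rfl rfl]
            ring
          · rw [if_neg h1k, if_neg h2k,
              if_congr (show (n ≤ k ∧ k - n < m) ↔ (n ≤ k ∧ k - n < m + 1) by omega) rfl rfl,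
              if_congr (show (2*n ≤ k ∧ k - 2*n < m) ↔ (2*n ≤ k ∧ k - 2*n < m + 1) by omega) rfl rfl]
            ring
      · rw [s2, ih.2]
        by_cases h1k : m + n = k
        · have hkn : k - n = m := by omega
          rw [hkn, if_pos h1k,
            if_neg (show ¬(m + 2*n = k) by omega),
            if_neg (show ¬(n ≤ k ∧ m < m) by omega),
            if_pos (show n ≤ k ∧ m < m + 1 by omega),
            if_congr (show (2*n ≤ k ∧ k - 2*n < m) ↔ (2*n ≤ k ∧ k - 2*n < m + 1) by omega) rfl rfl]
          ring
        · by_cases h2k : m + 2*n = k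
          · have hkn : k - 2*n = m := by omega
            rw [hkn, if_pos h2k, if_neg h1k,
              if_neg (show ¬(2*n ≤ k ∧ m < m) by omega),
              if_pos (show 2*n ≤ k ∧ m < m + 1 by omega),
              if_congr (show (n ≤ k ∧ k - n < m) ↔ (n ≤ k ∧ k - n < m + 1) by omega) rfl rfl]
            ring
          · rw [if_neg h1k, if_neg h2k,
              if_congr (show (n ≤ k ∧ k - n < m) ↔ (n ≤ k ∧ k - n < m + 1) by omega) rfl rfl,
              if_congr (show (2*n ≤ k ∧ k - 2*n < m) ↔ (2*n ≤ k ∧ k - 2*n < m + 1) by omega) rfl rfl]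
            ring
  refine ⟨(inv nmax).1.trans ?_, (inv nmax).2.trans ?_⟩ <;>
    rw [if_congr (show (n ≤ k ∧ k - n < nmax) ↔ n ≤ k by omega) rfl rfl,
      if_congr (show (2*n ≤ k ∧ k - 2*n < nmax) ↔ 2*n ≤ k by omega) rfl rfl]

-- B: backward pass -----------------------------------------------------------
theorem pvBBwd_length (N n : Nat) (p : List Int × List Int) :
    (pvBBwd N n p).1.length = p.1.length ∧ (pvBBwd N n p).2.length = p.2.length := by
  rw [pvBBwd]
  generalize (List.range' n (N - n)).reverse = xs
  induction xs generalizing p with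
  | nil => exact ⟨rfl, rfl⟩
  | cons x xs ih =>
    rw [List.foldl_cons]
    refine (ih _).imp (fun h => h.trans ?_) (fun h => h.trans ?_) <;> simp

theorem pvBBwd_getD (N n : Nat) (p : List Int × List Int) (hn : 1 ≤ n)
    (h1 : p.1.length = N) (h2 : p.2.length = N) (k : Nat) :
    (pvBBwd N n p).1.getD k 0 =
      p.1.getD k 0 + (if n ≤ k ∧ k < N then p.1.getD (k - n) 0 else 0) ∧
    (pvBBwd N n p).2.getD k 0 =
      p.2.getD k 0 - (if n ≤ k ∧ k < N then p.2.getD (k - n) 0 else 0) := by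
  rw [pvBBwd]
  have inv : ∀ (m : Nat), ∀ (p : List Int × List Int), n + m ≤ N →
      p.1.length = N → p.2.length = N → ∀ k,
      (((List.range' n m).reverse).foldl
        (fun p k => (p.1.set k (p.1.getD k 0 + p.1.getD (k - n) 0),
                     p.2.set k (p.2.getD k 0 - p.2.getD (k - n) 0))) p).1.getD k 0 =
        p.1.getD k 0 + (if n ≤ k ∧ k < n + m then p.1.getD (k - n) 0 else 0) ∧
      (((List.range' n m).reverse).foldl
        (fun p k => (p.1.set k (p.1.getD k 0 + p.1.getD (k - n) 0),
                     p.2.set k (p.2.getD k 0 - p.2.getD (k - n) 0))) p).2.getD k 0 =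
        p.2.getD k 0 - (if n ≤ k ∧ k < n + m then p.2.getD (k - n) 0 else 0) := by
    intro m
    induction m with
    | zero =>
      intro p _ _ _ k
      rw [List.range'_zero, List.reverse_nil, List.foldl_nil]
      constructor <;> rw [if_neg (show ¬(n ≤ k ∧ k < n + 0) by omega)] <;> ring
    | succ m ih =>
      intro p hm hp1 hp2 k
      rw [List.range'_concat, one_mul, List.reverse_append, List.reverse_singleton,
        List.singleton_append, List.foldl_cons]
      obtain ⟨i1, i2⟩ := ih (p.1.set (n + m) (p.1.getD (n + m) 0 + p.1.getD (n + m - n) 0),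
          p.2.set (n + m) (p.2.getD (n + m) 0 - p.2.getD (n + m - n) 0))
        (by omega) (by simp [hp1]) (by simp [hp2]) k
      rw [i1, i2]
      dsimp only
      rw [show n + m - n = m by omega, pv_getD_set, pv_getD_set, pv_getD_set, pv_getD_set,
        hp1, hp2]
      constructor
      · by_cases hk : n + m = k
        · subst hk
          rw [if_pos ⟨rfl, by omega⟩,
            if_neg (show ¬(n ≤ n + m ∧ n + m < n + m) by omega),
            if_pos (show n ≤ n + m ∧ n + m < n + (m + 1) by omega),
            show n + m - n = m by omega]
          ring
        · rw [if_neg (show ¬(n + m = k ∧ n + m < N) by tauto)]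
          by_cases hreg : n ≤ k ∧ k < n + m
          · rw [if_pos hreg, if_neg (show ¬(n + m = k - n ∧ n + m < N) by omega),
              if_pos (show n ≤ k ∧ k < n + (m + 1) by omega)]
          · rw [if_neg hreg, if_neg (show ¬(n ≤ k ∧ k < n + (m + 1)) by omega)]
      · by_cases hk : n + m = k
        · subst hk
          rw [if_pos ⟨rfl, by omega⟩,
            if_neg (show ¬(n ≤ n + m ∧ n + m < n + m) by omega),
            if_pos (show n ≤ n + m ∧ n + m < n + (m + 1) by omega),
            show n + m - n = m by omega]
          ring
        · rw [if_neg (show ¬(n + m = k ∧ n + m < N) by tauto)]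
          by_cases hreg : n ≤ k ∧ k < n + m
          · rw [if_pos hreg, if_neg (show ¬(n + m = k - n ∧ n + m < N) by omega),
              if_pos (show n ≤ k ∧ k < n + (m + 1) by omega)]
          · rw [if_neg hreg, if_neg (show ¬(n ≤ k ∧ k < n + (m + 1)) by omega)]
  by_cases hnN : n ≤ N
  · obtain ⟨i1, i2⟩ := inv (N - n) p (by omega) h1 h2 k
    rw [show n + (N - n) = N by omega] at i1 i2
    exact ⟨i1, i2⟩
  · rw [show N - n = 0 by omega, List.range'_zero, List.reverse_nil, List.foldl_nil]
    constructor <;> rw [if_neg (show ¬(n ≤ k ∧ k < N) by omega)] <;> ring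

-- main loop invariant ---------------------------------------------------------
theorem pv_getD_replicate (N k : Nat) : (List.replicate N (0:Int)).getD k 0 = 0 := by
  simp only [List.getD_eq_getElem?_getD, List.getElem?_replicate]
  split <;> rfl

theorem pvLenA (N m : Nat) :
    ((List.range' 1 m).foldl (fun b n => pvAStepBos N n b)
      ((List.replicate N (0:Int)).set 0 1)).length = N := by
  induction m with
  | zero => simp
  | succ m ih =>
    rw [List.range'_concat, one_mul, List.foldl_append, List.foldl_cons, List.foldl_nil,
      pvAStepBos_length]

theorem pvLenB (N m : Nat) :
    ((List.range' 1 m).foldl (fun b n => pvBFwd N n (pvBFwd N n b))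
      ((List.replicate N (0:Int)).set 0 1)).length = N := by
  induction m with
  | zero => simp
  | succ m ih =>
    rw [List.range'_concat, one_mul, List.foldl_append, List.foldl_cons, List.foldl_nil,
      pvBFwd_length, pvBFwd_length, ih]

theorem pvLenF (N m : Nat) :
    ((List.range' 1 m).foldl (fun p n => pvAStepFerm N n p.1 p.2)
      ((List.replicate N (0:Int)).set 0 1, List.replicate N (0:Int))).1.length = N ∧
    ((List.range' 1 m).foldl (fun p n => pvAStepFerm N n p.1 p.2)
      ((List.replicate N (0:Int)).set 0 1, List.replicate N (0:Int))).2.length = N := by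
  induction m with
  | zero => constructor <;> simp
  | succ m ih =>
    rw [List.range'_concat, one_mul, List.foldl_append, List.foldl_cons, List.foldl_nil]
    exact ⟨(pvAStepFerm_length N _ _ _).1.trans ih.1, (pvAStepFerm_length N _ _ _).2.trans ih.2⟩

theorem pvLenPS (N m : Nat) :
    ((List.range' 1 m).foldl (fun p n => pvBBwd N n (pvBBwd N n p))
      ((List.replicate N (0:Int)).set 0 1, (List.replicate N (0:Int)).set 0 1)).1.length = N ∧
    ((List.range' 1 m).foldl (fun p n => pvBBwd N n (pvBBwd N n p))
      ((List.replicate N (0:Int)).set 0 1, (List.replicate N (0:Int)).set 0 1)).2.length = N := by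
  induction m with
  | zero => constructor <;> simp
  | succ m ih =>
    rw [List.range'_concat, one_mul, List.foldl_append, List.foldl_cons, List.foldl_nil]
    exact ⟨(pvBBwd_length N _ _).1.trans ((pvBBwd_length N _ _).1.trans ih.1),
      (pvBBwd_length N _ _).2.trans ((pvBBwd_length N _ _).2.trans ih.2)⟩

theorem pv_main_inv (N m : Nat) (hN : 1 ≤ N) :
    ∀ k,
      ((List.range' 1 m).foldl (fun b n => pvAStepBos N n b)
          ((List.replicate N (0:Int)).set 0 1)).getD k 0 =
      ((List.range' 1 m).foldl (fun b n => pvBFwd N n (pvBFwd N n b))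
          ((List.replicate N (0:Int)).set 0 1)).getD k 0 ∧
      (((List.range' 1 m).foldl (fun p n => pvBBwd N n (pvBBwd N n p))
          ((List.replicate N (0:Int)).set 0 1, (List.replicate N (0:Int)).set 0 1)).1.getD k 0 =
        ((List.range' 1 m).foldl (fun p n => pvAStepFerm N n p.1 p.2)
          ((List.replicate N (0:Int)).set 0 1, List.replicate N (0:Int))).1.getD k 0 +
        ((List.range' 1 m).foldl (fun p n => pvAStepFerm N n p.1 p.2)
          ((List.replicate N (0:Int)).set 0 1, List.replicate N (0:Int))).2.getD k 0) ∧
      (((List.range' 1 m).foldl (fun p n => pvBBwd N n (pvBBwd N n p))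
          ((List.replicate N (0:Int)).set 0 1, (List.replicate N (0:Int)).set 0 1)).2.getD k 0 =
        ((List.range' 1 m).foldl (fun p n => pvAStepFerm N n p.1 p.2)
          ((List.replicate N (0:Int)).set 0 1, List.replicate N (0:Int))).1.getD k 0 -
        ((List.range' 1 m).foldl (fun p n => pvAStepFerm N n p.1 p.2)
          ((List.replicate N (0:Int)).set 0 1, List.replicate N (0:Int))).2.getD k 0) := by
  induction m with
  | zero =>
    intro k
    simp only [List.range'_zero, List.foldl_nil]
    exact ⟨by simp, by rw [pv_getD_replicate]; ring, by rw [pv_getD_replicate]; ring⟩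
  | succ m ih =>
    intro k
    simp only [List.range'_concat, one_mul, List.foldl_append, List.foldl_cons, List.foldl_nil]
    have hbos := fun k => (ih k).1
    have hP := fun k => (ih k).2.1
    have hS := fun k => (ih k).2.2
    have hn' : 1 ≤ 1 + m := by omega
    by_cases hkN : k < N
    · refine ⟨?_, ?_, ?_⟩
      · rw [pvAStepBos_getD N (1+m) _ hn' (pvLenA N m) k hkN,
          pvBFwd_getD N (1+m) _ hn' (by rw [pvBFwd_length, pvLenB]) k hkN,
          pvF1_congr (1+m) _ (pvF1 (1+m) (fun j =>
              ((List.range' 1 m).foldl (fun b n => pvBFwd N n (pvBFwd N n b))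
                ((List.replicate N (0:Int)).set 0 1)).getD j 0)) k
            (fun j hj => pvBFwd_getD N (1+m) _ hn' (pvLenB N m) j (by omega)),
          pvF1_F1_eq_T (1+m) _ k hn']
        rw [show (fun j => ((List.range' 1 m).foldl (fun b n => pvAStepBos N n b)
            ((List.replicate N (0:Int)).set 0 1)).getD j 0)
          = (fun j => ((List.range' 1 m).foldl (fun b n => pvBFwd N n (pvBFwd N n b))
            ((List.replicate N (0:Int)).set 0 1)).getD j 0) from funext hbos]
      · obtain ⟨a1, a2⟩ := pvAStepFerm_getD N (1+m) _ _ hn' (pvLenF N m).1 (pvLenF N m).2 k hkN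
        rw [a1, a2,
          (pvBBwd_getD N (1+m) _ hn'
            (by rw [(pvBBwd_length N _ _).1, (pvLenPS N m).1])
            (by rw [(pvBBwd_length N _ _).2, (pvLenPS N m).2]) k).1,
          (pvBBwd_getD N (1+m) _ hn' (pvLenPS N m).1 (pvLenPS N m).2 k).1,
          (pvBBwd_getD N (1+m) _ hn' (pvLenPS N m).1 (pvLenPS N m).2 (k - (1+m))).1,
          hP k, hP (k - (1+m)), hP (k - (1+m) - (1+m)),
          show k - (1+m) - (1+m) = k - 2*(1+m) by omega,
          if_congr (show (1+m ≤ k ∧ k < N) ↔ 1+m ≤ k by omega) rfl rfl,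
          if_congr (show (1+m ≤ k - (1+m) ∧ k - (1+m) < N) ↔ 2*(1+m) ≤ k by omega) rfl rfl]
        split_ifs <;> first | omega | ring
      · obtain ⟨a1, a2⟩ := pvAStepFerm_getD N (1+m) _ _ hn' (pvLenF N m).1 (pvLenF N m).2 k hkN
        rw [a1, a2,
          (pvBBwd_getD N (1+m) _ hn'
            (by rw [(pvBBwd_length N _ _).1, (pvLenPS N m).1])
            (by rw [(pvBBwd_length N _ _).2, (pvLenPS N m).2]) k).2,
          (pvBBwd_getD N (1+m) _ hn' (pvLenPS N m).1 (pvLenPS N m).2 k).2,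
          (pvBBwd_getD N (1+m) _ hn' (pvLenPS N m).1 (pvLenPS N m).2 (k - (1+m))).2,
          hS k, hS (k - (1+m)), hS (k - (1+m) - (1+m)),
          show k - (1+m) - (1+m) = k - 2*(1+m) by omega,
          if_congr (show (1+m ≤ k ∧ k < N) ↔ 1+m ≤ k by omega) rfl rfl,
          if_congr (show (1+m ≤ k - (1+m) ∧ k - (1+m) < N) ↔ 2*(1+m) ≤ k by omega) rfl rfl]
        split_ifs <;> first | omega | ring
    · have hA1 : (pvAStepBos N (1+m) ((List.range' 1 m).foldl (fun b n => pvAStepBos N n b)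
          ((List.replicate N (0:Int)).set 0 1))).getD k 0 = 0 :=
        pv_getD_of_len_le _ _ (by rw [pvAStepBos_length]; omega)
      have hB1 : (pvBFwd N (1+m) (pvBFwd N (1+m) ((List.range' 1 m).foldl
          (fun b n => pvBFwd N n (pvBFwd N n b))
          ((List.replicate N (0:Int)).set 0 1)))).getD k 0 = 0 :=
        pv_getD_of_len_le _ _ (by rw [pvBFwd_length, pvBFwd_length, pvLenB]; omega)
      have hF := pvAStepFerm_length N (1+m)
        ((List.range' 1 m).foldl (fun p n => pvAStepFerm N n p.1 p.2)
          ((List.replicate N (0:Int)).set 0 1, List.replicate N (0:Int))).1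
        ((List.range' 1 m).foldl (fun p n => pvAStepFerm N n p.1 p.2)
          ((List.replicate N (0:Int)).set 0 1, List.replicate N (0:Int))).2
      have hPS := pvBBwd_length N (1+m) (pvBBwd N (1+m)
        ((List.range' 1 m).foldl (fun p n => pvBBwd N n (pvBBwd N n p))
          ((List.replicate N (0:Int)).set 0 1, (List.replicate N (0:Int)).set 0 1)))
      have hPS0 := pvBBwd_length N (1+m)
        ((List.range' 1 m).foldl (fun p n => pvBBwd N n (pvBBwd N n p))
          ((List.replicate N (0:Int)).set 0 1, (List.replicate N (0:Int)).set 0 1))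
      refine ⟨?_, ?_, ?_⟩
      · rw [hA1, hB1]
      · rw [pv_getD_of_len_le _ _ (by rw [hPS.1, hPS0.1, (pvLenPS N m).1]; omega),
          pv_getD_of_len_le _ _ (by rw [hF.1, (pvLenF N m).1]; omega),
          pv_getD_of_len_le _ _ (by rw [hF.2, (pvLenF N m).2]; omega)]
        ring
      · rw [pv_getD_of_len_le _ _ (by rw [hPS.2, hPS0.2, (pvLenPS N m).2]; omega),
          pv_getD_of_len_le _ _ (by rw [hF.1, (pvLenF N m).1]; omega),
          pv_getD_of_len_le _ _ (by rw [hF.2, (pvLenF N m).2]; omega)]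
        ring

-- final summation loop: A's pair fold equals B's two scalar folds
theorem pv_final (N : Nat) (weight : Int) (bA bB fe fo P S : List Int)
    (hbos : ∀ k, bA.getD k 0 = bB.getD k 0)
    (hP : ∀ k, P.getD k 0 = fe.getD k 0 + fo.getD k 0)
    (hS : ∀ k, S.getD k 0 = fe.getD k 0 - fo.getD k 0)
    (hw : 1 ≤ weight) (hN : N = weight.toNat + 1) :
    ∀ (L : List Nat), (∀ wb ∈ L, wb < N) → ∀ (a1 a2 : Int),
    L.foldl (fun (t : Int × Int) (wb : Nat) =>
        if 0 ≤ weight - (wb : Int) ∧ weight - (wb : Int) < (N : Int) then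
          (t.1 + bA.getD wb 0 * fe.getD (weight - (wb : Int)).toNat 0,
           t.2 + bA.getD wb 0 * fo.getD (weight - (wb : Int)).toNat 0)
        else t) (a1, a2)
    = (L.foldl (fun t wb => t + bB.getD wb 0 *
          PySem.Int.floordiv (P.getD (N - 1 - wb) 0 + S.getD (N - 1 - wb) 0) 2) a1,
       L.foldl (fun t wb => t + bB.getD wb 0 *
          PySem.Int.floordiv (P.getD (N - 1 - wb) 0 - S.getD (N - 1 - wb) 0) 2) a2) := by
  intro L
  induction L with
  | nil => intro _ a1 a2; simp
  | cons wb L ih =>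
    intro h a1 a2
    have hwb : wb < N := h wb List.mem_cons_self
    rw [List.foldl_cons, List.foldl_cons, List.foldl_cons,
      if_pos (show (0:Int) ≤ weight - (wb : Int) ∧ weight - (wb : Int) < (N : Int) by
        constructor <;> omega),
      show (weight - (wb : Int)).toNat = N - 1 - wb by omega]
    have hPS1 : PySem.Int.floordiv (P.getD (N-1-wb) 0 + S.getD (N-1-wb) 0) 2
        = fe.getD (N-1-wb) 0 := by
      rw [hP, hS, show fe.getD (N-1-wb) 0 + fo.getD (N-1-wb) 0
            + (fe.getD (N-1-wb) 0 - fo.getD (N-1-wb) 0) = 2 * fe.getD (N-1-wb) 0 by ring,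
        PySem.Int.floordiv_eq_ediv_of_pos (by norm_num)]
      omega
    have hPS2 : PySem.Int.floordiv (P.getD (N-1-wb) 0 - S.getD (N-1-wb) 0) 2
        = fo.getD (N-1-wb) 0 := by
      rw [hP, hS, show fe.getD (N-1-wb) 0 + fo.getD (N-1-wb) 0
            - (fe.getD (N-1-wb) 0 - fo.getD (N-1-wb) 0) = 2 * fo.getD (N-1-wb) 0 by ring,
        PySem.Int.floordiv_eq_ediv_of_pos (by norm_num)]
      omega
    rw [hPS1, hPS2, hbos wb]
    exact ih (fun x hx => h x (List.mem_cons_of_mem _ hx)) _ _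

-- ===== VERDICT (by name: the statement is the Claim_ definition above) =====
theorem local_cdr_states_py_spec : Claim_equal_local_cdr_states_py := by
  intro weight bosonic _
  unfold Spec_local_cdr_states_py
  rw [local_cdr_states_py, local_cdr_states_py_alt]
  by_cases hneg : weight < 0
  · rw [if_pos hneg, if_pos hneg]
  · rw [if_neg hneg, if_neg hneg]
    by_cases h0 : weight = 0
    · subst h0
      cases bosonic <;> decide
    · have hw : 1 ≤ weight := by omega
      have hN1 : (weight + 1).toNat = weight.toNat + 1 := by omega
      rw [if_neg h0, hN1]
      dsimp only
      have hmain := pv_main_inv (weight.toNat + 1) (weight.toNat + 1 - 1) (by omega)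
      have hkey := pv_final (weight.toNat + 1) weight _ _ _ _ _ _
        (fun k => (hmain k).1) (fun k => (hmain k).2.1) (fun k => (hmain k).2.2) hw rfl
        (List.range (weight.toNat + 1)) (fun wb hwb => List.mem_range.1 hwb) 0 0
      cases bosonic
      · simp only [Bool.false_eq_true, if_false]
        rw [hkey]
      · simp only [if_true]
        rw [hkey]
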